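-- pv_equiv track=rewrite | github.com/jcolinpatrick/kryptos | scripts/_uncategorized/e_s_62_width7_sa.py | check_periodic
-- ===== SOURCE A (Python) =====
-- def check_periodic(fixed, period):
--     """Check if all constrained key values are consistent with period p."""
--     residues = {}
--     for pos, val in fixed.items():
--         r = pos % period
--         if r in residues:
--             if residues[r] != val:
--                 return False, {}
--         else:
--             residues[r] = val
--     return True, residues
-- ===== SOURCE B (Python) =====
-- def check_periodic(fixed, period):
--     """Check if all constrained key values are consistent with period p."""
--     # Phase 1: group every constrained value by its residue class mod period.
--     groups = {}
--     for pos, val in fixed.items():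
--         groups.setdefault(pos % period, []).append(val)
--     # Phase 2: the period is consistent iff each residue class holds one value.
--     if any(v != vals[0] for vals in groups.values() for v in vals):
--         return False, {}
--     # Phase 3: one representative per residue class.
--     return True, {r: vals[0] for r, vals in groups.items()}
-- ===== Notes on version B (the rewrite author's own statement) =====
-- stated objective: alternative
-- what changed: B first builds a residue->list-of-values grouping dict in one pass, then validates all groups in a separate pass and extracts one representative per group, instead of A's single loop that validates while inserting and early-returns inside the loop.
import Mathlib
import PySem

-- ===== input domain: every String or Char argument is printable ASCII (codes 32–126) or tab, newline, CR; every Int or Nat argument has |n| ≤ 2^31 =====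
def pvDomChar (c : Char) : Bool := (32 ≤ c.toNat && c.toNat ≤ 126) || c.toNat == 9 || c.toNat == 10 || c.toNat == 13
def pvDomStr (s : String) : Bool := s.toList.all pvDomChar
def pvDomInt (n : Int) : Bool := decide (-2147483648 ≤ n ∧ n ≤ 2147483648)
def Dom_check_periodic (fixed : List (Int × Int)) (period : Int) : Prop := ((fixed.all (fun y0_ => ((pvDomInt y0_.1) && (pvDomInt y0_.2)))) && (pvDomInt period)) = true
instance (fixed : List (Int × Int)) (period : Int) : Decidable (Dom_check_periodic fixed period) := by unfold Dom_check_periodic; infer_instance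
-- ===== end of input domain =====

-- B replaces A's validate-while-inserting loop with a separate grouping pass, a validation
-- pass over the groups, and a representative-extraction pass (alternative decomposition, same cost).


-- ===== PORT A =====
-- the 'for pos, val in fixed.items():' loop with its two early returns
def check_periodic_loopA (period : Int) : List (Int × Int) → PySem.Dict Int Int → Bool × (List (Int × Int))
  | [], residues => (true, residues.items)
  | pv :: rest, residues =>
    let r := PySem.Int.mod pv.1 period
    match residues.get? r with
    | some v => if v ≠ pv.2 then (false, []) else check_periodic_loopA period rest residues
    | none => check_periodic_loopA period rest (residues.insert r pv.2)

def check_periodic (fixed : List (Int × Int)) (period : Int) : Bool × (List (Int × Int)) :=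
  check_periodic_loopA period fixed PySem.Dict.empty

-- ===== PORT B =====
-- Phase 1: groups.setdefault(pos % period, []).append(val) is Dict.modify k [] (· ++ [val])
-- (exact: Python appends in place to the list stored under k, or stores [val] for a new k).
def check_periodic_groupsB (fixed : List (Int × Int)) (period : Int) : PySem.Dict Int (List Int) :=
  fixed.foldl (fun g pv => g.modify (PySem.Int.mod pv.1 period) [] (· ++ [pv.2])) PySem.Dict.empty

-- Phases 2 and 3; vals[0] is ported as .headD 0, exact because every group is created nonempty.
def check_periodic_alt (fixed : List (Int × Int)) (period : Int) : Bool × (List (Int × Int)) :=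
  let groups := check_periodic_groupsB fixed period
  if groups.items.any (fun rv => rv.2.any (fun v => v != rv.2.headD 0)) then (false, [])
  else (true, groups.items.map (fun rv => (rv.1, rv.2.headD 0)))

-- ===== PRECONDITION & SPEC =====
-- Pre_ excludes period = 0, where A raises ZeroDivisionError, and association lists with
-- duplicate keys, which do not represent any Python dict (fixed is a dict in A, so Python
-- itself can never present duplicate keys to it).
def Pre_check_periodic (fixed : List (Int × Int)) (period : Int) : Prop :=
  period ≠ 0 ∧ (fixed.map Prod.fst).Nodup
instance (fixed : List (Int × Int)) (period : Int) : Decidable (Pre_check_periodic fixed period) := by unfold Pre_check_periodic; infer_instance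

def pvWitness_check_periodic : (List (Int × Int)) × Int := ([(0, 5), (1, 6), (3, 5)], 2)

def Spec_check_periodic (fixed : List (Int × Int)) (period : Int) (out : Bool × (List (Int × Int))) : Prop := out = check_periodic_alt fixed period
instance (fixed : List (Int × Int)) (period : Int) (out : Bool × (List (Int × Int))) : Decidable (Spec_check_periodic fixed period out) := by unfold Spec_check_periodic; infer_instance

-- ===== CLAIM (what is proved, stated in full; the proofs are below) =====
def Claim_equal_check_periodic : Prop := ∀ (fixed : List (Int × Int)) (period : Int), Dom_check_periodic fixed period → Pre_check_periodic fixed period → Spec_check_periodic fixed period (check_periodic fixed period)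

-- ===== LEMMAS AND PROOFS =====

-- A's residues dict is B's grouping dict with each group replaced by its first element.
def pvMapHead (g : PySem.Dict Int (List Int)) : PySem.Dict Int Int :=
  PySem.Dict.mk (g.items.map (fun rv => (rv.1, rv.2.headD 0)))

lemma pvMapHead_get? (g : PySem.Dict Int (List Int)) (r : Int) :
    (pvMapHead g).get? r = (g.get? r).map (fun vs => vs.headD 0) := by
  simp [pvMapHead, PySem.Dict.get?, List.find?_map, Function.comp_def, Option.map_map]

lemma pv_headD_append (vs l : List Int) (h : vs ≠ []) :
    (vs ++ l).headD 0 = vs.headD 0 := by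
  cases vs with
  | nil => exact absurd rfl h
  | cons a t => rfl

lemma pv_key_unique {α : Type} {l : List (Int × α)} (h : (l.map Prod.fst).Nodup)
    {p q : Int × α} (hp : p ∈ l) (hq : q ∈ l) (hk : p.1 = q.1) : p = q := by
  induction l with
  | nil => cases hp
  | cons x t ih =>
    simp only [List.map_cons, List.nodup_cons] at h
    rcases List.mem_cons.mp hp with rfl | hp'
    · rcases List.mem_cons.mp hq with rfl | hq'
      · rfl
      · exact absurd (hk ▸ List.mem_map_of_mem hq') h.1
    · rcases List.mem_cons.mp hq with rfl | hq'
      · exact absurd (hk ▸ List.mem_map_of_mem hp') h.1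
      · exact ih h.2 hp' hq'

-- the invariant A's accumulator and B's groups maintain together
def pvInv (g : PySem.Dict Int (List Int)) : Prop :=
  g.keys.Nodup ∧ ∀ p ∈ g.items, p.2 ≠ [] ∧ ∀ v ∈ p.2, v = p.2.headD 0

-- B phases 2+3 as a function of the grouping dict
def pvFinishB (g : PySem.Dict Int (List Int)) : Bool × (List (Int × Int)) :=
  if g.items.any (fun rv => rv.2.any (fun v => v != rv.2.headD 0)) then (false, [])
  else (true, g.items.map (fun rv => (rv.1, rv.2.headD 0)))

lemma pv_modify_present (g : PySem.Dict Int (List Int)) (r v : Int) (vs : List Int)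
    (h : g.get? r = some vs) :
    g.modify r [] (· ++ [v]) = g.insert r (vs ++ [v]) := by
  simp [PySem.Dict.modify, PySem.Dict.getD_of_get?_eq_some g [] h]

lemma pvMapHead_insert_present (g : PySem.Dict Int (List Int)) (r v : Int) (vs : List Int)
    (h : g.get? r = some vs) (hne : vs ≠ []) (hn : g.keys.Nodup) :
    pvMapHead (g.insert r (vs ++ [v])) = pvMapHead g := by
  have hc : g.contains r = true := by
    rw [PySem.Dict.contains_eq_isSome_get?, h]; rfl
  have hmem : (r, vs) ∈ g.items := PySem.Dict.mem_items_of_get?_eq_some g h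
  simp only [pvMapHead, PySem.Dict.items_insert_of_contains g (vs ++ [v]) hc, List.map_map]
  congr 1
  apply List.map_congr_left
  intro p hp
  by_cases hk : (p.1 == r) = true
  · have hp1 : p.1 = r := eq_of_beq hk
    have : p = (r, vs) := pv_key_unique (by simpa [PySem.Dict.keys] using hn) hp hmem (by simpa using hp1)
    subst this
    simp only [Function.comp_apply, if_pos hk]
    rw [pv_headD_append vs [v] hne]
  · simp only [Function.comp_apply, if_neg hk]

lemma pvMapHead_insert_absent (g : PySem.Dict Int (List Int)) (r v : Int)
    (h : g.get? r = none) :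
    pvMapHead (g.modify r [] (· ++ [v])) = (pvMapHead g).insert r v := by
  have hc : g.contains r = false := by
    rw [PySem.Dict.contains_eq_isSome_get?, h]; rfl
  have hc' : (pvMapHead g).contains r = false := by
    rw [PySem.Dict.contains_eq_isSome_get?, pvMapHead_get?, h]; rfl
  have hd : g.getD r [] = [] := PySem.Dict.getD_of_not_contains g [] hc
  have hm : g.modify r [] (· ++ [v]) = PySem.Dict.mk (g.items ++ [(r, [v])]) := by
    simp [PySem.Dict.modify, PySem.Dict.insert, hd, hc]
  apply PySem.Dict.ext
  rw [PySem.Dict.items_insert_of_not_contains _ v hc', hm]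
  simp [pvMapHead]

-- once a value is in a group it stays there, and the group's head never changes
lemma pv_grow (period : Int) (rest : List (Int × Int)) :
    ∀ (g : PySem.Dict Int (List Int)) (r : Int) (vs : List Int), g.get? r = some vs →
    ∃ t, (rest.foldl (fun g pv => g.modify (PySem.Int.mod pv.1 period) [] (· ++ [pv.2])) g).get? r
          = some (vs ++ t) := by
  induction rest with
  | nil => intro g r vs h; exact ⟨[], by simpa using h⟩
  | cons pv rest ih =>
    intro g r vs h
    simp only [List.foldl_cons]
    by_cases hk : r = PySem.Int.mod pv.1 period
    · have h2 : (g.modify (PySem.Int.mod pv.1 period) [] (· ++ [pv.2])).get? r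
          = some (vs ++ [pv.2]) := by
        rw [pv_modify_present g _ pv.2 vs (hk ▸ h), PySem.Dict.get?_insert, if_pos hk]
      obtain ⟨t, ht⟩ := ih _ r (vs ++ [pv.2]) h2
      exact ⟨[pv.2] ++ t, by simpa using ht⟩
    · have h2 : (g.modify (PySem.Int.mod pv.1 period) [] (· ++ [pv.2])).get? r = some vs := by
        rw [PySem.Dict.modify, PySem.Dict.get?_insert, if_neg hk]; exact h
      exact ih _ r vs h2

lemma pv_finish_false (g : PySem.Dict Int (List Int)) (r : Int) (vs : List Int)
    (h : g.get? r = some vs) (v : Int) (hv : v ∈ vs) (hne : v ≠ vs.headD 0) :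
    pvFinishB g = (false, []) := by
  simp only [PySem.Dict.get?] at h
  obtain ⟨p, hfind, hp2⟩ : ∃ p, g.items.find? (fun p => p.1 == r) = some p ∧ p.2 = vs := by
    cases hf : g.items.find? (fun p => p.1 == r) with
    | none => rw [hf] at h; cases h
    | some p => rw [hf] at h; exact ⟨p, rfl, by simpa using h⟩
  have hmem : p ∈ g.items := List.mem_of_find?_eq_some hfind
  have hb : (v != p.2.headD 0) = true := bne_iff_ne.mpr (by rw [hp2]; exact hne)
  have hthis : g.items.any (fun rv => rv.2.any (fun v => v != rv.2.headD 0)) = true :=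
    List.any_eq_true.mpr ⟨p, hmem, List.any_eq_true.mpr ⟨v, hp2 ▸ hv, hb⟩⟩
  simp only [pvFinishB]
  rw [hthis]
  rfl

-- the central lemma: A's loop from a consistent state equals B's finish of the grouping fold
lemma pv_main (period : Int) (rest : List (Int × Int)) :
    ∀ (g : PySem.Dict Int (List Int)), pvInv g →
    check_periodic_loopA period rest (pvMapHead g)
      = pvFinishB (rest.foldl (fun g pv => g.modify (PySem.Int.mod pv.1 period) [] (· ++ [pv.2])) g) := by
  induction rest with
  | nil =>
    intro g hg
    have hany : g.items.any (fun rv => rv.2.any (fun v => v != rv.2.headD 0)) = false := by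
      rw [List.any_eq_false]
      intro p hp
      rw [Bool.not_eq_true, List.any_eq_false]
      intro v hv
      rw [Bool.not_eq_true]
      exact bne_eq_false_iff_eq.mpr ((hg.2 p hp).2 v hv)
    simp only [List.foldl_nil, check_periodic_loopA, pvFinishB]
    rw [hany]
    rfl
  | cons pv rest ih =>
    intro g hg
    simp only [List.foldl_cons]
    rcases hget : g.get? (PySem.Int.mod pv.1 period) with _ | vs
    · -- new residue class: both sides extend with a singleton group / its value
      have hstep : check_periodic_loopA period (pv :: rest) (pvMapHead g)
          = check_periodic_loopA period rest ((pvMapHead g).insert (PySem.Int.mod pv.1 period) pv.2) := by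
        simp [check_periodic_loopA, pvMapHead_get?, hget]
      rw [hstep, ← pvMapHead_insert_absent g _ pv.2 hget]
      apply ih
      constructor
      · have : (g.modify (PySem.Int.mod pv.1 period) [] (· ++ [pv.2])).keys.Nodup :=
          PySem.Dict.nodup_keys_insert _ _ _ hg.1
        exact this
      · intro p hp
        rw [PySem.Dict.modify] at hp
        rcases (PySem.Dict.mem_items_insert _ _ _ _).mp hp with rfl | ⟨hp', _⟩
        · have hd : g.getD (PySem.Int.mod pv.1 period) [] = [] :=
            PySem.Dict.getD_of_not_contains g []
              (by rw [PySem.Dict.contains_eq_isSome_get?, hget]; rfl)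
          simp [hd]
        · exact hg.2 p hp'
    · have hmem : (PySem.Int.mod pv.1 period, vs) ∈ g.items := PySem.Dict.mem_items_of_get?_eq_some g hget
      have hvs := hg.2 _ hmem
      by_cases hv : vs.headD 0 = pv.2
      · -- matching value: A's dict unchanged, B appends an equal value to the group
        have hstep : check_periodic_loopA period (pv :: rest) (pvMapHead g)
            = check_periodic_loopA period rest (pvMapHead g) := by
          simp only [check_periodic_loopA, pvMapHead_get?, hget, Option.map_some]
          rw [if_neg (fun hcon => hcon hv)]
        rw [hstep, pv_modify_present g _ pv.2 vs hget,
            ← pvMapHead_insert_present g _ pv.2 vs hget hvs.1 hg.1,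
            ← pv_modify_present g _ pv.2 vs hget]
        apply ih
        constructor
        · exact PySem.Dict.nodup_keys_insert _ _ _ hg.1
        · intro p hp
          rw [PySem.Dict.modify] at hp
          rcases (PySem.Dict.mem_items_insert _ _ _ _).mp hp with rfl | ⟨hp', _⟩
          · have hd : g.getD (PySem.Int.mod pv.1 period) [] = vs :=
              PySem.Dict.getD_of_get?_eq_some g [] hget
            refine ⟨by simp [hd], ?_⟩
            intro v hvmem
            rw [hd, pv_headD_append vs [pv.2] hvs.1]
            rcases List.mem_append.mp (hd ▸ hvmem) with h1 | h1
            · exact hvs.2 v h1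
            · rw [List.mem_singleton.mp h1, hv]
          · exact hg.2 p hp'
      · -- mismatch: A returns (False, {}); B's group now holds two distinct values forever
        have hstep : check_periodic_loopA period (pv :: rest) (pvMapHead g) = (false, []) := by
          simp only [check_periodic_loopA, pvMapHead_get?, hget, Option.map_some]
          rw [if_pos hv]
        have h2 : (g.modify (PySem.Int.mod pv.1 period) [] (· ++ [pv.2])).get? (PySem.Int.mod pv.1 period)
            = some (vs ++ [pv.2]) := by
          rw [pv_modify_present g _ pv.2 vs hget, PySem.Dict.get?_insert, if_pos rfl]
        obtain ⟨t, ht⟩ := pv_grow period rest _ _ _ h2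
        have hne2 : pv.2 ≠ (vs ++ [pv.2] ++ t).headD 0 := by
          rw [List.append_assoc, pv_headD_append vs ([pv.2] ++ t) hvs.1]
          exact fun h => hv h.symm
        rw [hstep, pv_finish_false _ _ _ ht pv.2 (by simp) hne2]

-- ===== VERDICT (by name: the statement is the Claim_ definition above) =====
theorem check_periodic_spec : Claim_equal_check_periodic := by
  intro fixed period _ _
  unfold Spec_check_periodic check_periodic check_periodic_alt check_periodic_groupsB
  have h0 : pvMapHead (PySem.Dict.mk []) = PySem.Dict.empty := rfl
  have := pv_main period fixed (PySem.Dict.mk [])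
    (by constructor <;> simp [PySem.Dict.keys])
  rw [h0] at this
  rw [this]
  rfl
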